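-- pv_equiv track=rewrite | github.com/bert-nmt/ctx-bert-nmt | code/examples/opensubtitle_enzh/prepare_index.py | parse_doc
-- ===== SOURCE A (Python) =====
-- def parse_doc(lines, token):
--     docs = []
--     idx = 0
--     for line in lines:
--         if line.strip() == token:
--             docs.append(idx)
--         else:
--             idx += 1
--     return docs
-- ===== SOURCE B (Python) =====
-- def parse_doc(lines, token):
--     positions = [i for i, line in enumerate(lines) if line.strip() == token]
--     return [p - k for k, p in enumerate(positions)]
-- ===== Notes on version B (the rewrite author's own statement) =====
-- stated objective: idiomatic
-- what changed: Replaced the stateful counter loop (increment idx on non-marker lines) with a two-pass comprehension: first collect marker positions via enumerate, then map the k-th position p to p - k.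
import Mathlib
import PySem

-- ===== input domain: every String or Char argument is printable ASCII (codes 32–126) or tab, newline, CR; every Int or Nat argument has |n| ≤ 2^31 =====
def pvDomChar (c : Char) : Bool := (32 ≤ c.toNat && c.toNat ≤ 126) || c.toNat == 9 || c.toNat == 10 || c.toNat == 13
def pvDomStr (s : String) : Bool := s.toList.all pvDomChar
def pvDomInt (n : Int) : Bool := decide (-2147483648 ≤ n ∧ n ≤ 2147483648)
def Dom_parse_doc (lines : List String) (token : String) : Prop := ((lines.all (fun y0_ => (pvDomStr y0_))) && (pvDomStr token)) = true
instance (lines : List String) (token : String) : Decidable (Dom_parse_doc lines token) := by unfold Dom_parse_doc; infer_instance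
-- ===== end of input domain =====

-- B replaces A's stateful counter loop with a two-pass decomposition: collect marker positions, then map the k-th position p to p - k (idiomatic; same cost).


-- ===== PORT A =====
def parse_doc (lines : List String) (token : String) : List Int :=
  (lines.foldl (fun (s : List Int × Int) line =>
      if PySem.Str.strip line == token then (s.1 ++ [s.2], s.2) else (s.1, s.2 + 1))
    (([] : List Int), (0 : Int))).1

-- ===== PORT B =====
def parse_doc_alt (lines : List String) (token : String) : List Int :=
  let positions : List Int :=
    ((PySem.List.enumerate lines 0).filter (fun p => PySem.Str.strip p.2 == token)).map (·.1)
  (PySem.List.enumerate positions 0).map (fun kp => kp.2 - kp.1)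

-- ===== PRECONDITION & SPEC =====
def Spec_parse_doc (lines : List String) (token : String) (out : List Int) : Prop := out = parse_doc_alt lines token
instance (lines : List String) (token : String) (out : List Int) : Decidable (Spec_parse_doc lines token out) := by unfold Spec_parse_doc; infer_instance

-- ===== CLAIM (what is proved, stated in full; the proofs are below) =====
def Claim_equal_parse_doc : Prop := ∀ (lines : List String) (token : String), Dom_parse_doc lines token → Spec_parse_doc lines token (parse_doc lines token)

-- ===== LEMMAS AND PROOFS =====

/-- Reference recursion: value of A's loop starting with counter `s` and empty accumulator. -/
def pvGo (token : String) : List String → Int → List Int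
  | [], _ => []
  | l :: ls, s => if PySem.Str.strip l == token then s :: pvGo token ls s else pvGo token ls (s + 1)

theorem pvFoldA (token : String) (lines : List String) :
    ∀ (acc : List Int) (s : Int),
      (lines.foldl (fun (st : List Int × Int) line =>
          if PySem.Str.strip line == token then (st.1 ++ [st.2], st.2) else (st.1, st.2 + 1))
        (acc, s)).1 = acc ++ pvGo token lines s := by
  induction lines with
  | nil => intro acc s; simp [pvGo]
  | cons l ls ih =>
    intro acc s
    rw [List.foldl_cons]
    by_cases h : PySem.Str.strip l = token
    · rw [if_pos (by simp [h]), ih]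
      simp [pvGo, h]
    · rw [if_neg (by simp [h]), ih]
      simp [pvGo, h]

theorem pvAltGo (token : String) (lines : List String) :
    ∀ (s k0 : Int),
      (PySem.List.enumerate
          (((PySem.List.enumerate lines s).filter (fun p => PySem.Str.strip p.2 == token)).map (·.1))
          k0).map (fun kp => kp.2 - kp.1) = pvGo token lines (s - k0) := by
  induction lines with
  | nil => intro s k0; simp [pvGo, PySem.List.enumerate_nil]
  | cons l ls ih =>
    intro s k0
    rw [PySem.List.enumerate_cons]
    by_cases h : PySem.Str.strip l = token
    · rw [List.filter_cons_of_pos (by simp [h]), List.map_cons, PySem.List.enumerate_cons,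
        List.map_cons, ih (s + 1) (k0 + 1)]
      have e : s + 1 - (k0 + 1) = s - k0 := by ring
      simp [pvGo, h, e]
    · rw [List.filter_cons_of_neg (by simp [h]), ih (s + 1) k0]
      have e : s + 1 - k0 = s - k0 + 1 := by ring
      simp [pvGo, h, e]

-- ===== VERDICT (by name: the statement is the Claim_ definition above) =====
theorem parse_doc_spec : Claim_equal_parse_doc := by
  intro lines token _
  unfold Spec_parse_doc parse_doc parse_doc_alt
  rw [pvFoldA token lines [] 0, pvAltGo token lines 0 0]
  simp
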